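-- pv_equiv track=rewrite | github.com/thatMissingSock/dataStructureAndAlgorithmsRevision | week 2/minimumEdgeWeightFromAVertexIII.py | min_edge_weight_ind
-- ===== SOURCE A (Python) =====
-- def min_edge_weight_ind(M, i):
--     """
--     This needs to take in a weighted matrix (M) and a value for an vertex that your checking (i) and return another vertex
--     that is connected to the one you are checking but with the SMALLEST VALUE!
--     :param M: A weighted matrix.
--     :param i: A vertex to check.
--     :return: The connected vertex with the SMALLEST EDGE.
--     """
--     tempOutput = None
--     tempWeightedValue = None
--     for column in range(len(M[0])):
--         if tempOutput is None and M[i][column] is not None: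
--             tempOutput = column
--             tempWeightedValue = M[i][column]
--         elif M[i][column] is not None:
--             if tempWeightedValue > M[i][column]:
--                 tempOutput = column
--                 tempWeightedValue = M[i][column]
--
--     return tempOutput
-- ===== SOURCE B (Python) =====
-- def min_edge_weight_ind(M, i):
--     candidates = sorted((M[i][c], c) for c in range(len(M[0])) if M[i][c] is not None)
--     if candidates:
--         return candidates[0][1]
--     return None
-- ===== Notes on version B (the rewrite author's own statement) =====
-- stated objective: alternative
-- what changed: Replaces A's single-pass running-minimum state machine (tempOutput/tempWeightedValue with branch logic) by a staged filter-sort-take-first pipeline: collect the non-None (weight, column) tuples, sort them lexicographically, and return the column of the first element.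
import Mathlib
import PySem

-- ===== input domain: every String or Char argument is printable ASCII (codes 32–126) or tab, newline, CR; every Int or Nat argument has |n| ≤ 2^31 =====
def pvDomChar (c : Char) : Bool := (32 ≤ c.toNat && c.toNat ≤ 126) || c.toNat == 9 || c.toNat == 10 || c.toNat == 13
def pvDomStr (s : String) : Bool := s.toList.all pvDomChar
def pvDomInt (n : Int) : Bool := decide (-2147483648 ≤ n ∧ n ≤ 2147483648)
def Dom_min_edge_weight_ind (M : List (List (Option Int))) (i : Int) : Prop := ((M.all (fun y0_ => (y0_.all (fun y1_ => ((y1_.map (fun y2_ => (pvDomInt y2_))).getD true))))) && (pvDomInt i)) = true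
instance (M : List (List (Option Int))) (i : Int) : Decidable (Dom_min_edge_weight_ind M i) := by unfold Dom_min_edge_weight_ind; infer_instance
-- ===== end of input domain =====

-- B replaces A's single-pass running-minimum state machine by a staged pipeline:
-- collect the non-None (weight, column) pairs, sort them lexicographically, return the
-- first element's column (objective: alternative decomposition, not faster).

-- ===== PORT A =====
-- one loop iteration of A: state = (tempOutput, tempWeightedValue), v = M[i][column]
def minEdgeStep (st : Option Int × Option Int) (v : Option Int) (column : Int) : Option Int × Option Int :=
  if st.1 = none ∧ v ≠ none then (some column, v)
  else if v ≠ none then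
    match st.2, v with
    | some tw, some w => if tw > w then (some column, some w) else st
    | _, _ => st  -- Python would raise TypeError here; unreachable (st.2 is some whenever st.1 is)
  else st

def min_edge_weight_ind (M : List (List (Option Int))) (i : Int) : Option Int :=
  ((PySem.List.pyRange 0 ((PySem.List.pyGetD M 0 []).length : Int) 1).foldl
    (fun st column =>
      minEdgeStep st (PySem.List.pyGetD (PySem.List.pyGetD M i []) column none) column)
    (none, none)).1

-- ===== PORT B =====
-- candidates = sorted((M[i][c], c) for c in range(len(M[0])) if M[i][c] is not None);
-- Python's tuple sort is PySem.List.sorted2 on (fst, snd); then candidates[0][1] if any.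
def min_edge_weight_ind_alt (M : List (List (Option Int))) (i : Int) : Option Int :=
  match PySem.List.sorted2
      ((PySem.List.pyRange 0 ((PySem.List.pyGetD M 0 []).length : Int) 1).filterMap
        (fun c => (PySem.List.pyGetD (PySem.List.pyGetD M i []) c none).map (fun w => (w, c))))
      (fun p => p.1) (fun p => p.2) with
  | p :: _ => some p.2
  | [] => none

-- ===== PRECONDITION & SPEC =====
-- Pre_ excludes exactly the inputs where the Python A raises IndexError: M empty (M[0]),
-- or — when the first row is non-empty, so the loop body runs — i out of range for M,
-- or row M[i] shorter than row M[0].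
def Pre_min_edge_weight_ind (M : List (List (Option Int))) (i : Int) : Prop :=
  M ≠ [] ∧ (M.headI.length = 0 ∨
    (PySem.Raise.InRange M.length i ∧ M.headI.length ≤ (PySem.List.pyGetD M i []).length))
instance (M : List (List (Option Int))) (i : Int) : Decidable (Pre_min_edge_weight_ind M i) := by
  unfold Pre_min_edge_weight_ind; infer_instance

def pvWitness_min_edge_weight_ind : List (List (Option Int)) × Int :=
  ([[some 3, some 1], [some 2, none]], 0)

def Spec_min_edge_weight_ind (M : List (List (Option Int))) (i : Int) (out : Option Int) : Prop := out = min_edge_weight_ind_alt M i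
instance (M : List (List (Option Int))) (i : Int) (out : Option Int) : Decidable (Spec_min_edge_weight_ind M i out) := by unfold Spec_min_edge_weight_ind; infer_instance

-- ===== CLAIM (what is proved, stated in full; the proofs are below) =====
def Claim_equal_min_edge_weight_ind : Prop := ∀ (M : List (List (Option Int))) (i : Int), Dom_min_edge_weight_ind M i → Pre_min_edge_weight_ind M i → Spec_min_edge_weight_ind M i (min_edge_weight_ind M i)

-- ===== LEMMAS AND PROOFS =====

-- the lexicographic first-minimum fold over the candidate list (proof-only intermediate)
def altStep (row : List (Option Int)) (acc : Option (Int × Int)) (c : Int) : Option (Int × Int) :=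
  match (PySem.List.pyGetD row c none).map (fun w => (w, c)) with
  | none => acc
  | some x =>
    match acc with
    | none => some x
    | some m => if (decide (x.1 < m.1) || !decide (m.1 < x.1) && decide (x.2 < m.2)) = true then some x else some m

-- relate A's state to the fold's accumulator
def convSt (acc : Option (Int × Int)) : Option Int × Option Int :=
  match acc with
  | none => (none, none)
  | some (w, o) => (some o, some w)

lemma fold_rel (row : List (Option Int)) :
    ∀ (cs : List Int), cs.Pairwise (· < ·) →
    ∀ (acc : Option (Int × Int)), (∀ w o, acc = some (w, o) → ∀ c ∈ cs, o < c) →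
    cs.foldl (fun st column =>
        minEdgeStep st (PySem.List.pyGetD row column none) column) (convSt acc)
      = convSt (cs.foldl (altStep row) acc) := by
  intro cs
  induction cs with
  | nil => intro _ _ _; rfl
  | cons c cs ih =>
    intro hp acc hacc
    simp only [List.foldl_cons]
    rcases List.pairwise_cons.mp hp with ⟨hc, hp'⟩
    cases hv : PySem.List.pyGetD row c none with
    | none =>
      have h1 : minEdgeStep (convSt acc) none c = convSt acc := by
        cases acc with
        | none => rfl
        | some p => cases p; rfl
      have h2 : altStep row acc c = acc := by
        simp [altStep, hv]
      rw [h1, h2]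
      exact ih hp' acc (fun w o h c' hc' => hacc w o h c' (List.mem_cons_of_mem _ hc'))
    | some w =>
      cases acc with
      | none =>
        have h1 : minEdgeStep (convSt none) (some w) c = convSt (some (w, c)) := by rfl
        have h2 : altStep row none c = some (w, c) := by simp [altStep, hv]
        rw [h1, h2]
        exact ih hp' (some (w, c)) (by intro w' o' h c' hc'; cases h; exact hc c' hc')
      | some p =>
        obtain ⟨w0, o0⟩ := p
        have ho : o0 < c := hacc w0 o0 rfl c (List.mem_cons_self)
        have h2 : altStep row (some (w0, o0)) c
            = if w0 > w then some (w, c) else some (w0, o0) := by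
          simp only [altStep, hv, Option.map_some]
          have : ¬ (c < o0) := by omega
          by_cases hw : w < w0
          · simp [hw, gt_iff_lt]
          · by_cases hw' : w0 < w
            · simp [hw, hw', gt_iff_lt, this]
            · simp [hw, hw', gt_iff_lt, this]
        have h1 : minEdgeStep (convSt (some (w0, o0))) (some w) c
            = convSt (if w0 > w then some (w, c) else some (w0, o0)) := by
          simp only [minEdgeStep, convSt]
          by_cases hw : w0 > w <;> simp [hw]
        rw [h1, h2]
        by_cases hw : w0 > w
        · simp only [hw, if_pos]
          exact ih hp' (some (w, c)) (by intro w' o' h c' hc'; cases h; exact hc c' hc')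
        · simp only [hw, if_false]
          exact ih hp' (some (w0, o0))
            (by intro w' o' h c' hc'; cases h
                exact lt_trans ho (hc c' hc'))

lemma pyRange_pairwise (n : Nat) : (PySem.List.pyRange 0 (n : Int) 1).Pairwise (· < ·) := by
  rw [PySem.List.pyRange_zero_natCast]
  exact (List.pairwise_lt_range).map _ (by intro a b h; exact_mod_cast h)

-- the candidate fold is min2? over the candidate list
lemma foldl_altStep_eq_min2? (row : List (Option Int)) (cs : List Int) :
    cs.foldl (altStep row) none
      = PySem.List.min2?
          (cs.filterMap (fun c => (PySem.List.pyGetD row c none).map (fun w => (w, c))))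
          (fun p => p.1) (fun p => p.2) := by
  show _ = List.foldl _ none _
  rw [List.foldl_filterMap]
  congr 1
  funext x y
  cases h : PySem.List.pyGetD row y none <;> cases x <;> simp [altStep, h]

-- the boolean tuple comparison of sorted2/min2? IS Lean's lexicographic order on Int ×ₗ Int
lemma lexB_eq (p q : Int × Int) :
    (decide (p.1 < q.1) || !decide (q.1 < p.1) && decide (p.2 < q.2))
      = decide (toLex p < toLex q) := by
  apply Bool.eq_iff_iff.mpr
  simp only [decide_eq_true_eq, Bool.or_eq_true, Bool.and_eq_true, Bool.not_eq_true',
    decide_eq_false_iff_not, Prod.Lex.lt_iff, ofLex_toLex]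
  constructor
  · rintro (h | ⟨h1, h2⟩)
    · exact Or.inl h
    · rcases lt_or_eq_of_le (not_lt.mp h1) with h | h
      · exact Or.inl h
      · exact Or.inr ⟨h, h2⟩
  · rintro (h | ⟨h1, h2⟩)
    · exact Or.inl h
    · exact Or.inr ⟨by omega, h2⟩

lemma sorted2_eq_sorted_lex (xs : List (Int × Int)) :
    PySem.List.sorted2 xs (fun p => p.1) (fun p => p.2)
      = PySem.List.sorted xs (fun p => toLex p) := by
  have hb : (fun a b : Int × Int =>
        (decide (a.1 < b.1) || !decide (b.1 < a.1) && decide (a.2 < b.2)))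
      = fun a b : Int × Int => decide (toLex a < toLex b) := by
    funext a b; exact lexB_eq a b
  simp only [PySem.List.sorted2, PySem.List.sorted, if_neg (Bool.false_ne_true)]
  rw [hb]

lemma min2?_eq_min?_lex (xs : List (Int × Int)) :
    PySem.List.min2? xs (fun p => p.1) (fun p => p.2)
      = PySem.List.min? xs (fun p => toLex p) := by
  simp only [PySem.List.min2?, PySem.List.min?]
  congr 1
  funext acc x
  cases acc with
  | none => rfl
  | some m =>
    simp only [lexB_eq x m, decide_eq_true_eq]

-- head of a sort by an injective key is the first minimum
lemma head_sorted_eq_min? (xs : List (Int × Int)) :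
    (PySem.List.sorted xs (fun p => toLex p)).head?
      = PySem.List.min? xs (fun p => toLex p) := by
  cases h : PySem.List.sorted xs (fun p => toLex p) with
  | nil =>
    have hx : xs = [] := (PySem.List.sorted_eq_nil_iff xs _ false).mp h
    simp [hx, (PySem.List.min?_eq_none_iff ([] : List (Int × Int)) _).mpr rfl]
  | cons m t =>
    have hm : m ∈ xs := (PySem.List.sorted_perm xs (fun p => toLex p) false).mem_iff.mp
      (h ▸ List.mem_cons_self)
    cases hmin : PySem.List.min? xs (fun p => toLex p) with
    | none =>
      have : xs = [] := (PySem.List.min?_eq_none_iff xs _).mp hmin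
      subst this; simp at hm
    | some m' =>
      have hm' : m' ∈ xs := PySem.List.min?_mem hmin
      have h1 : toLex m ≤ toLex m' := PySem.List.key_head_sorted_le xs _ h m' hm'
      have h2 : toLex m' ≤ toLex m := PySem.List.min?_isMin hmin m hm
      have : toLex m = toLex m' := le_antisymm h1 h2
      have : m = m' := toLex.injective this
      simp [this]

-- ===== VERDICT (by name: the statement is the Claim_ definition above) =====
theorem min_edge_weight_ind_spec : Claim_equal_min_edge_weight_ind := by
  intro M i _ _
  unfold Spec_min_edge_weight_ind min_edge_weight_ind min_edge_weight_ind_alt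
  rw [show ((none, none) : Option Int × Option Int) = convSt none from rfl]
  rw [fold_rel (PySem.List.pyGetD M i []) _ (pyRange_pairwise _) none (by simp)]
  rw [foldl_altStep_eq_min2?, min2?_eq_min?_lex, sorted2_eq_sorted_lex, ← head_sorted_eq_min?]
  cases (PySem.List.sorted
      ((PySem.List.pyRange 0 ((PySem.List.pyGetD M 0 []).length : Int) 1).filterMap
        (fun c => (PySem.List.pyGetD (PySem.List.pyGetD M i []) c none).map (fun w => (w, c))))
      (fun p => toLex p)) with
  | nil => rfl
  | cons p t => cases p; rfl
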